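-- pv_equiv track=rewrite | github.com/ryangerardwilson/erza | app/src/erza/runtime.py | _ascii_art_input_summary
-- ===== SOURCE A (Python) =====
-- def _ascii_art_input_summary(value: str) -> str:
--     normalized = value.replace("\r\n", "\n").replace("\r", "\n").strip("\n")
--     if not normalized:
--         return "Open in editor"
--     lines = normalized.split("\n")
--     line_count = len(lines)
--     max_columns = max((len(line) for line in lines), default=0)
--     line_label = "line" if line_count == 1 else "lines"
--     column_label = "col" if max_columns == 1 else "cols"
--     return f"{line_count} {line_label}, {max_columns} {column_label}"
-- ===== SOURCE B (Python) =====
-- def _ascii_art_input_summary(value: str) -> str: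
--     normalized = value.replace("\r\n", "\n").replace("\r", "\n").strip("\n")
--     if not normalized:
--         return "Open in editor"
--     line_count = 1
--     cur = 0
--     max_columns = 0
--     for ch in normalized:
--         if ch == "\n":
--             line_count += 1
--             cur = 0
--         else:
--             cur += 1
--             if cur > max_columns:
--                 max_columns = cur
--     line_label = "line" if line_count == 1 else "lines"
--     column_label = "col" if max_columns == 1 else "cols"
--     return f"{line_count} {line_label}, {max_columns} {column_label}"
-- ===== Notes on version B (the rewrite author's own statement) =====
-- stated objective: alternative
-- what changed: Replaces the split-into-lines list plus len/max-over-generator with a single character pass over the normalized text keeping running line/column counters.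
import Mathlib
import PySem

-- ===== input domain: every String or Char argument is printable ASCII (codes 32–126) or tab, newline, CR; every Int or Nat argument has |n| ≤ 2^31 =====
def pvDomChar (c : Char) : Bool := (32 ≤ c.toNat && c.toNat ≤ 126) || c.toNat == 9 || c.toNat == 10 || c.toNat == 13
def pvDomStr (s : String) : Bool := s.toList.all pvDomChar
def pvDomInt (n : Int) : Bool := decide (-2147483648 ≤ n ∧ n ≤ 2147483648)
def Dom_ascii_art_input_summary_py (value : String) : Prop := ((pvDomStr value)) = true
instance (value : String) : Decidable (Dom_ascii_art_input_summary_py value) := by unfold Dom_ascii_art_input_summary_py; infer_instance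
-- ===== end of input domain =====

-- B replaces A's split-into-lines list plus len/max with one character pass keeping running counters (objective: alternative).

-- ===== PORT A =====
def ascii_art_input_summary_py (value : String) : String :=
  let normalized := PySem.Str.stripChars
    (PySem.Str.replace (PySem.Str.replace value "\r\n" "\n") "\r" "\n") "\n"
  if normalized = "" then "Open in editor"
  else
    let lines := (PySem.Chars.splitOn normalized.toList ("\n".toList)).map String.ofList
    let line_count : Int := PySem.List.len lines
    let max_columns : Int :=
      (PySem.List.max? (lines.map (fun line => PySem.Str.len line)) (fun x => x)).getD 0
    let line_label := if line_count = 1 then "line" else "lines"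
    let column_label := if max_columns = 1 then "col" else "cols"
    PySem.Int.toStr line_count ++ " " ++ line_label ++ ", " ++
      PySem.Int.toStr max_columns ++ " " ++ column_label

-- ===== PORT B =====
def ascii_art_input_summary_py_alt (value : String) : String :=
  let normalized := PySem.Str.stripChars
    (PySem.Str.replace (PySem.Str.replace value "\r\n" "\n") "\r" "\n") "\n"
  if normalized = "" then "Open in editor"
  else
    let st := normalized.toList.foldl
      (fun (st : Int × Int × Int) ch =>
        if ch = '\n' then (st.1 + 1, 0, st.2.2)
        else
          let cur := st.2.1 + 1
          (st.1, cur, if cur > st.2.2 then cur else st.2.2))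
      (1, 0, 0)
    let line_count := st.1
    let max_columns := st.2.2
    let line_label := if line_count = 1 then "line" else "lines"
    let column_label := if max_columns = 1 then "col" else "cols"
    PySem.Int.toStr line_count ++ " " ++ line_label ++ ", " ++
      PySem.Int.toStr max_columns ++ " " ++ column_label

-- ===== PRECONDITION & SPEC =====
def Spec_ascii_art_input_summary_py (value : String) (out : String) : Prop := out = ascii_art_input_summary_py_alt value
instance (value : String) (out : String) : Decidable (Spec_ascii_art_input_summary_py value out) := by unfold Spec_ascii_art_input_summary_py; infer_instance

-- ===== CLAIM (what is proved, stated in full; the proofs are below) =====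
def Claim_equal_ascii_art_input_summary_py : Prop := ∀ (value : String), Dom_ascii_art_input_summary_py value → Spec_ascii_art_input_summary_py value (ascii_art_input_summary_py value)

-- ===== LEMMAS AND PROOFS =====

-- Structural version of splitting on a single character, convenient for induction.
def pvSplit1 (c : Char) : List Char → List (List Char)
  | [] => [[]]
  | a :: t => if a = c then [] :: pvSplit1 c t else (pvSplit1 c t).modifyHead (a :: ·)

theorem pvSplit1_ne_nil (c : Char) (l : List Char) : pvSplit1 c l ≠ [] := by
  induction l with
  | nil => simp [pvSplit1]
  | cons a t ih =>
    simp only [pvSplit1]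
    split_ifs
    · simp
    · cases h : pvSplit1 c t with
      | nil => exact absurd h ih
      | cons x xs => simp [List.modifyHead]

theorem pvSplitOn_go_single (c : Char) (fuel : Nat) :
    ∀ (l cur : List Char) (acc : List (List Char)), l.length ≤ fuel →
      PySem.Chars.splitOn.go [c] fuel l cur acc =
        acc.reverse ++ (pvSplit1 c l).modifyHead (cur.reverse ++ ·) := by
  induction fuel with
  | zero =>
    intro l cur acc h
    have : l = [] := List.eq_nil_of_length_eq_zero (Nat.le_zero.mp h)
    subst this
    simp [PySem.Chars.splitOn.go, pvSplit1, List.modifyHead]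
  | succ n ih =>
    intro l cur acc h
    cases l with
    | nil => simp [PySem.Chars.splitOn.go, pvSplit1, List.modifyHead]
    | cons a t =>
      simp only [PySem.Chars.splitOn.go]
      simp only [List.length_cons] at h
      by_cases hc : a = c
      · subst hc
        rw [if_pos (by simp [List.isPrefixOf])]
        rw [show List.drop [a].length (a :: t) = t from rfl]
        rw [ih t [] (cur.reverse :: acc) (by omega)]
        cases hsp : pvSplit1 a t with
        | nil => exact absurd hsp (pvSplit1_ne_nil a t)
        | cons y ys => simp [pvSplit1, hsp, List.modifyHead]
      · rw [if_neg (by simp [List.isPrefixOf]; exact fun hh => hc hh.symm)]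
        rw [ih t (a :: cur) acc (by omega)]
        simp only [pvSplit1, if_neg hc]
        cases hsp : pvSplit1 c t with
        | nil => exact absurd hsp (pvSplit1_ne_nil c t)
        | cons y ys => simp [List.modifyHead]

theorem pvSplitOn_eq (l : List Char) :
    PySem.Chars.splitOn l ['\n'] = pvSplit1 '\n' l := by
  unfold PySem.Chars.splitOn
  rw [pvSplitOn_go_single '\n' (l.length + 1) l [] [] (by omega)]
  cases hsp : pvSplit1 '\n' l with
  | nil => exact absurd hsp (pvSplit1_ne_nil _ _)
  | cons y ys => simp [List.modifyHead]

-- B's fold step, named for the proofs.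
def pvStep (st : Int × Int × Int) (ch : Char) : Int × Int × Int :=
  if ch = '\n' then (st.1 + 1, 0, st.2.2)
  else
    let cur := st.2.1 + 1
    (st.1, cur, if cur > st.2.2 then cur else st.2.2)

theorem pvStep_nl (lc cur mx : Int) : pvStep (lc, cur, mx) '\n' = (lc + 1, 0, mx) := by
  simp [pvStep]

theorem pvStep_ch (lc cur mx : Int) (a : Char) (hc : ¬ a = '\n') :
    pvStep (lc, cur, mx) a = (lc, cur + 1, if cur + 1 > mx then cur + 1 else mx) := by
  simp [pvStep, hc]

theorem pvSplit1_nl (t : List Char) : pvSplit1 '\n' ('\n' :: t) = [] :: pvSplit1 '\n' t := by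
  simp [pvSplit1]

theorem pvSplit1_ch (a : Char) (t : List Char) (hc : ¬ a = '\n') :
    pvSplit1 '\n' (a :: t) = (pvSplit1 '\n' t).modifyHead (a :: ·) := by
  simp [pvSplit1, hc]

theorem pvFold_fst (l : List Char) : ∀ (lc cur mx : Int),
    (l.foldl pvStep (lc, cur, mx)).1 = lc + ((pvSplit1 '\n' l).length : Int) - 1 := by
  induction l with
  | nil => intro lc cur mx; simp [pvSplit1]
  | cons a t ih =>
    intro lc cur mx
    by_cases hc : a = '\n'
    · subst hc
      rw [List.foldl_cons, pvStep_nl, ih, pvSplit1_nl, List.length_cons]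
      push_cast; ring
    · rw [List.foldl_cons, pvStep_ch lc cur mx a hc, ih, pvSplit1_ch a t hc,
        List.length_modifyHead]

theorem pvFold_max (l : List Char) : ∀ (lc cur mx : Int), 0 ≤ cur → cur ≤ mx →
    (l.foldl pvStep (lc, cur, mx)).2.2 =
      ((pvSplit1 '\n' l).tail.map (fun s => (s.length : Int))).foldl max
        (max mx (cur + ((pvSplit1 '\n' l).headI.length : Int))) := by
  induction l with
  | nil =>
    intro lc cur mx h0 hm
    simp only [List.foldl_nil, pvSplit1, List.tail_cons, List.headI, List.length_nil,
      List.map_nil]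
    omega
  | cons a t ih =>
    intro lc cur mx h0 hm
    by_cases hc : a = '\n'
    · subst hc
      rw [List.foldl_cons, pvStep_nl, ih (lc + 1) 0 mx le_rfl (le_trans h0 hm), pvSplit1_nl]
      cases hsp : pvSplit1 '\n' t with
      | nil => exact absurd hsp (pvSplit1_ne_nil _ _)
      | cons y ys =>
        simp only [List.headI, List.tail_cons, List.map_cons, List.foldl_cons,
          List.length_nil]
        congr 1
        omega
    · rw [List.foldl_cons, pvStep_ch lc cur mx a hc,
        ih lc (cur + 1) _ (by omega) (by split_ifs <;> omega), pvSplit1_ch a t hc]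
      cases hsp : pvSplit1 '\n' t with
      | nil => exact absurd hsp (pvSplit1_ne_nil _ _)
      | cons y ys =>
        simp only [List.modifyHead, List.headI, List.tail_cons, List.length_cons]
        congr 1
        have hy : (0:Int) ≤ (y.length : Int) := Int.natCast_nonneg _
        push_cast
        split_ifs <;> omega

-- ===== VERDICT (by name: the statement is the Claim_ definition above) =====
set_option maxHeartbeats 1000000 in
theorem ascii_art_input_summary_py_spec : Claim_equal_ascii_art_input_summary_py := by
  intro value _
  unfold Spec_ascii_art_input_summary_py ascii_art_input_summary_py ascii_art_input_summary_py_alt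
  generalize (PySem.Str.stripChars
    (PySem.Str.replace (PySem.Str.replace value "\r\n" "\n") "\r" "\n") "\n") = n
  by_cases he : n = ""
  · simp [he]
  · simp only [if_neg he]
    have hstep : (fun (st : Int × Int × Int) ch =>
        if ch = '\n' then (st.1 + 1, 0, st.2.2)
        else
          let cur := st.2.1 + 1
          (st.1, cur, if cur > st.2.2 then cur else st.2.2)) = pvStep := rfl
    cases hs : pvSplit1 '\n' n.toList with
    | nil => exact absurd hs (pvSplit1_ne_nil _ _)
    | cons x xs =>
      have hsplit : PySem.Chars.splitOn n.toList ("\n".toList) = x :: xs := by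
        rw [show ("\n".toList) = ['\n'] from rfl, pvSplitOn_eq, hs]
      have hlen : PySem.List.len ((x :: xs).map String.ofList) = ((x :: xs).length : Int) := by
        simp [PySem.List.len]
      have hmax : (PySem.List.max? (((x :: xs).map String.ofList).map
            (fun line => PySem.Str.len line)) (fun x => x)).getD 0
          = (xs.map (fun s => (s.length : Int))).foldl max ((x.length : Int)) := by
        simp only [List.map_cons, List.map_map]
        rw [PySem.List.max?_id_cons]
        simp [PySem.Str.len, Function.comp, List.foldl_map]
      have hfst : (n.toList.foldl pvStep (1, 0, 0)).1 = ((x :: xs).length : Int) := by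
        rw [pvFold_fst, hs, List.length_cons]
        push_cast; ring
      have hsnd : (n.toList.foldl pvStep (1, 0, 0)).2.2
          = (xs.map (fun s => (s.length : Int))).foldl max ((x.length : Int)) := by
        rw [pvFold_max n.toList 1 0 0 le_rfl le_rfl, hs]
        simp only [List.headI, List.tail_cons]
        congr 1
        omega
      simp only [hstep, hsplit, hlen, hmax, hfst, hsnd]
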